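-- pv_equiv track=rewrite | github.com/mathyomama/scripts | project-euler/euler111.py | changeDigit
-- ===== SOURCE A (Python) =====
-- def intFormat(number):
--     ans = 0
--     for digit in number:
--         ans *= 10
--         ans += digit
--     return ans
--
-- def changeDigit(number, indices):
--     index = indices.pop(0)
--     if index == 0:
--         values = range(1, 10) # 1 to 9 for most significant digit
--     elif index == len(number) - 1:
--         values = range(1, 10, 2) # odds for the least significant digit
--     else:
--         values = range(10) # all the digits
--     for value in values:
--         number[index] = value
--         if not indices:
--             yield intFormat(number)
--         else:
--             for i in changeDigit(number[:], indices[:]):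
--                 yield i
-- ===== SOURCE B (Python) =====
-- def intFormat(number):
--     ans = 0
--     for digit in number:
--         ans *= 10
--         ans += digit
--     return ans
--
-- def changeDigit(number, indices):
--     # Breadth-first: grow the list of candidate digit-lists one varied index
--     # at a time, then format them all.  Return value only: unlike A (a
--     # generator that pops indices[0] and writes into number), B does not
--     # mutate its arguments.
--     def values(index):
--         if index == 0:
--             return range(1, 10)
--         elif index == len(number) - 1:
--             return range(1, 10, 2)
--         else:
--             return range(10)
--     acc = [list(number)]
--     for index in indices:
--         nxt = []
--         for cand in acc:
--             for value in values(index):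
--                 new = cand[:]
--                 new[index] = value
--                 nxt.append(new)
--         acc = nxt
--     for cand in acc:
--         yield intFormat(cand)
-- ===== Notes on version B (the rewrite author's own statement) =====
-- stated objective: alternative
-- what changed: Replaces A's depth-first recursive generator (recursing with copies for each digit value) by a non-recursive breadth-first fold: a list of candidate digit-lists is expanded one varied index at a time, then formatted in one final pass; B does not mutate its arguments (equivalence is about the returned sequence only).
-- crash fix: On empty indices A raises IndexError (pop from empty list) while B returns the one-element list [intFormat(number)]; A also raises IndexError when some index is outside [-len(number), len(number)), where B raises too. — e.g. on changeDigit([1, 2], []): A raises IndexError, B returns [12]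
import Mathlib
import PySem

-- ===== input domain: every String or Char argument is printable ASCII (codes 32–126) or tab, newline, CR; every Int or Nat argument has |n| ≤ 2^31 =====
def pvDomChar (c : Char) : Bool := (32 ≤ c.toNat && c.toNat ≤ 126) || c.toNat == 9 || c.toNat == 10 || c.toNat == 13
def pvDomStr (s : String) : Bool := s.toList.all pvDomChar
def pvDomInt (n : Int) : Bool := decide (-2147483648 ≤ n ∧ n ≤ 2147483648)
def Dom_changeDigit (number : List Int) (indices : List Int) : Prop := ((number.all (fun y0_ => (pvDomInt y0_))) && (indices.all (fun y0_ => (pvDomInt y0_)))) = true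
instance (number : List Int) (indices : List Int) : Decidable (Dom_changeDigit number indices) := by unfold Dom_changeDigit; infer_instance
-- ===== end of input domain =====

-- B replaces A's depth-first recursive generator by a non-recursive breadth-first fold
-- (same returned sequence; unlike A, B does not mutate its arguments — return value only).


-- ===== PORT A =====
-- intFormat, the module helper both versions call
def pvIntFormat (number : List Int) : Int :=
  number.foldl (fun ans digit => ans * 10 + digit) 0

-- A, a generator: its port returns the list of yielded values. indices.pop(0)
-- raises on [], and number[index] = value raises out of [-len, len): both
-- excluded by Pre_ below; pySetD is exact inside that range.
def changeDigit (number : List Int) (indices : List Int) : List Int :=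
  match indices with
  | [] => []  -- Python raises IndexError here (outside Pre_)
  | index :: rest =>
    let values :=
      if index = 0 then PySem.List.pyRange 1 10 1
      else if index = (number.length : Int) - 1 then PySem.List.pyRange 1 10 2
      else PySem.List.pyRange 0 10 1
    values.foldl (fun acc value =>
      let number' := PySem.List.pySetD number index value
      if rest.isEmpty then acc ++ [pvIntFormat number']
      else acc ++ changeDigit number' rest) []
termination_by indices.length
decreasing_by simp

-- ===== PORT B =====
def changeDigit_alt (number : List Int) (indices : List Int) : List Int :=
  let values := fun (index : Int) =>
    if index = 0 then PySem.List.pyRange 1 10 1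
    else if index = (number.length : Int) - 1 then PySem.List.pyRange 1 10 2
    else PySem.List.pyRange 0 10 1
  let acc := indices.foldl (fun acc index =>
    acc.foldl (fun nxt cand =>
      (values index).foldl (fun nxt2 value =>
        nxt2 ++ [PySem.List.pySetD cand index value]) nxt) []) [number]
  acc.foldl (fun out cand => out ++ [pvIntFormat cand]) []

-- ===== PRECONDITION & SPEC =====
-- Pre_ excludes exactly the inputs where Python A raises IndexError:
-- empty indices (pop from empty list) and any index outside [-len, len).
def Pre_changeDigit (number : List Int) (indices : List Int) : Prop :=
  indices ≠ [] ∧ ∀ i ∈ indices, PySem.Raise.InRange number.length i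
instance (number : List Int) (indices : List Int) : Decidable (Pre_changeDigit number indices) := by unfold Pre_changeDigit; infer_instance
def pvWitness_changeDigit : List Int × List Int := ([1, 2, 3], [0, 2])

-- On empty indices Python A raises IndexError (pop from an empty list); B returns [intFormat(number)].
def Raises_changeDigit (number : List Int) (indices : List Int) : Prop := indices = []
instance (number : List Int) (indices : List Int) : Decidable (Raises_changeDigit number indices) := by unfold Raises_changeDigit; infer_instance
def pvRaiseWitness_changeDigit : List Int × List Int := ([1, 2], [])
def pvRaiseWitnessOut_changeDigit : List Int := [12]

def Spec_changeDigit (number : List Int) (indices : List Int) (out : List Int) : Prop := out = changeDigit_alt number indices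
instance (number : List Int) (indices : List Int) (out : List Int) : Decidable (Spec_changeDigit number indices out) := by unfold Spec_changeDigit; infer_instance

-- ===== CLAIM (what is proved, stated in full; the proofs are below) =====
def Claim_equal_changeDigit : Prop := ∀ (number : List Int) (indices : List Int), Dom_changeDigit number indices → Pre_changeDigit number indices → Spec_changeDigit number indices (changeDigit number indices)
def Claim_raises_changeDigit : Prop := (∀ (number : List Int) (indices : List Int), Dom_changeDigit number indices → Raises_changeDigit number indices → ¬ Pre_changeDigit number indices) ∧ (Dom_changeDigit (pvRaiseWitness_changeDigit.1) (pvRaiseWitness_changeDigit.2) ∧ Raises_changeDigit (pvRaiseWitness_changeDigit.1) (pvRaiseWitness_changeDigit.2) ∧ changeDigit_alt (pvRaiseWitness_changeDigit.1) (pvRaiseWitness_changeDigit.2) = pvRaiseWitnessOut_changeDigit)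

-- ===== LEMMAS AND PROOFS =====

-- the value-range of one index, as a function of the (invariant) length
def pvVals (L : Nat) (index : Int) : List Int :=
  if index = 0 then PySem.List.pyRange 1 10 1
  else if index = (L : Int) - 1 then PySem.List.pyRange 1 10 2
  else PySem.List.pyRange 0 10 1

-- one breadth-first expansion step, in flatMap form
def pvStep (L : Nat) (acc : List (List Int)) (index : Int) : List (List Int) :=
  acc.flatMap (fun cand => (pvVals L index).map (fun v => PySem.List.pySetD cand index v))

theorem pv_foldl_append {α β : Type} (f : α → β) (l : List α) (init : List β) :
    l.foldl (fun acc x => acc ++ [f x]) init = init ++ l.map f := by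
  induction l generalizing init with
  | nil => simp
  | cons x xs ih => simp [List.foldl, ih]

theorem pv_foldl_append' {α β : Type} (f : α → List β) (l : List α) (init : List β) :
    l.foldl (fun acc x => acc ++ f x) init = init ++ l.flatMap f := by
  induction l generalizing init with
  | nil => simp
  | cons x xs ih => simp [List.foldl, ih]

theorem pvStep_foldl (vals : List Int) (cand : List Int) (index : Int) (init : List (List Int)) :
    vals.foldl (fun nxt2 v => nxt2 ++ [PySem.List.pySetD cand index v]) init
      = init ++ vals.map (fun v => PySem.List.pySetD cand index v) :=
  pv_foldl_append _ _ _

-- B's inner double loop, for any value list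
theorem pv_inner (vals : List Int) (index : Int) (acc : List (List Int)) :
    acc.foldl (fun nxt cand =>
      vals.foldl (fun nxt2 value =>
        nxt2 ++ [PySem.List.pySetD cand index value]) nxt) []
      = acc.flatMap (fun cand => vals.map (fun v => PySem.List.pySetD cand index v)) := by
  have h : ∀ init, acc.foldl (fun nxt cand =>
      vals.foldl (fun nxt2 value =>
        nxt2 ++ [PySem.List.pySetD cand index value]) nxt) init
      = init ++ acc.flatMap (fun cand => vals.map (fun v => PySem.List.pySetD cand index v)) := by
    induction acc with
    | nil => intro init; simp
    | cons c cs ih =>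
      intro init
      simp only [List.foldl, List.flatMap_cons]
      rw [pvStep_foldl, ih, List.append_assoc]
  simpa using h []

theorem pv_foldl_step_append (L : Nat) (rest : List Int) (xs ys : List (List Int)) :
    rest.foldl (pvStep L) (xs ++ ys) = rest.foldl (pvStep L) xs ++ rest.foldl (pvStep L) ys := by
  induction rest generalizing xs ys with
  | nil => simp
  | cons i is ih =>
    simp only [List.foldl]
    rw [← ih]
    congr 1
    simp [pvStep]

theorem pv_foldl_step_flatMap (L : Nat) (rest : List Int) (xs : List (List Int)) :
    rest.foldl (pvStep L) xs = xs.flatMap (fun x => rest.foldl (pvStep L) [x]) := by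
  induction xs with
  | nil =>
    induction rest with
    | nil => simp
    | cons i is ih => simp [List.foldl, pvStep, ih]
  | cons x xs ih =>
    have : (x :: xs : List (List Int)) = [x] ++ xs := rfl
    rw [this, pv_foldl_step_append, ih]
    simp

theorem pv_length_pySetD (xs : List Int) (i v : Int) :
    (PySem.List.pySetD xs i v).length = xs.length :=
  PySem.List.length_pySetD xs i v

-- main invariant: A's recursion equals the breadth-first expansion, formatted
theorem pv_main (indices : List Int) (number : List Int) (h : indices ≠ []) :
    changeDigit number indices
      = (indices.foldl (pvStep number.length) [number]).map pvIntFormat := by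
  induction indices generalizing number with
  | nil => exact absurd rfl h
  | cons index rest ih =>
    rw [changeDigit]
    by_cases hr : rest = []
    · subst hr
      simp only [List.isEmpty_nil, if_true, List.foldl, pvStep, pvVals,
        List.flatMap_cons, List.flatMap_nil, List.append_nil]
      rw [pv_foldl_append]
      simp [List.map_map, Function.comp]
    · have hne : rest.isEmpty = false := by simpa [List.isEmpty_iff] using hr
      simp only [hne, Bool.false_eq_true, if_false]
      rw [pv_foldl_append']
      simp only [List.nil_append, List.foldl]
      have hstep1 : pvStep number.length [number] index
          = (pvVals number.length index).map (fun v => PySem.List.pySetD number index v) := by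
        simp [pvStep]
      rw [hstep1, pv_foldl_step_flatMap, List.map_flatMap, List.flatMap_map]
      apply List.flatMap_congr  -- pointwise
      intro v _
      rw [ih _ hr, pv_length_pySetD]

-- ===== VERDICT (by name: the statement is the Claim_ definition above) =====
theorem pv_fold_eq (L : Nat) (indices : List Int) :
    ∀ acc0 : List (List Int),
      indices.foldl (fun acc index =>
        acc.foldl (fun nxt cand =>
          (pvVals L index).foldl (fun nxt2 value =>
            nxt2 ++ [PySem.List.pySetD cand index value]) nxt) []) acc0
      = indices.foldl (pvStep L) acc0 := by
  induction indices with
  | nil => intro acc0; rfl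
  | cons i is ih =>
    intro acc0
    simp only [List.foldl]
    rw [pv_inner, ih]
    rfl

theorem changeDigit_spec : Claim_equal_changeDigit := by
  intro number indices _ hpre
  unfold Spec_changeDigit changeDigit_alt
  simp only []
  rw [pv_main indices number hpre.1, pv_foldl_append, List.nil_append]
  congr 1
  exact (pv_fold_eq number.length indices [number]).symm

theorem changeDigit_raises : Claim_raises_changeDigit := by
  unfold Claim_raises_changeDigit
  refine ⟨?_, by decide⟩
  intro number indices _ hr hpre
  exact hpre.1 hr

-- self-check: the raise-witness value really is what B's port returns there
theorem pvRaiseWitnessOut_ok :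
    changeDigit_alt pvRaiseWitness_changeDigit.1 pvRaiseWitness_changeDigit.2
      = pvRaiseWitnessOut_changeDigit :=
  changeDigit_raises.2.2.2
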